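-- pv_equiv track=rewrite | github.com/amnh-sciviz/amnh-time-machine | lib/eac_utils.py | getTypeFromId
-- ===== SOURCE A (Python) =====
-- def getTypes():
--     return {
--         "amnhc_0": "Museum",
--         "amnhp_1": "Person",
--         "amnhc_2": "Expedition",
--         "amnhc_3": "Department",
--         "amnhc_4": "Permanent Exhibition",
--         "amnhc_5": "Temporary Exhibition"
--     }
--
-- def getTypeFromId(id):
--     types = getTypes()
--     type = ""
--     for key in types:
--         if id.startswith(key):
--             type = types[key]
--             break
--     return type
-- ===== SOURCE B (Python) =====
-- def getTypes():
--     return {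
--         "amnhc_0": "Museum",
--         "amnhp_1": "Person",
--         "amnhc_2": "Expedition",
--         "amnhc_3": "Department",
--         "amnhc_4": "Permanent Exhibition",
--         "amnhc_5": "Temporary Exhibition"
--     }
--
-- def getTypeFromId(id):
--     # every key is exactly 7 characters, so startswith(key) == (id[:7] == key)
--     return getTypes().get(id[:7], "")
-- ===== Notes on version B (the rewrite author's own statement) =====
-- stated objective: idiomatic
-- what changed: Replaces the explicit loop with break and accumulator over the type table by slicing the fixed 7-char prefix once and doing a single dict .get lookup with default "".
import Mathlib
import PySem

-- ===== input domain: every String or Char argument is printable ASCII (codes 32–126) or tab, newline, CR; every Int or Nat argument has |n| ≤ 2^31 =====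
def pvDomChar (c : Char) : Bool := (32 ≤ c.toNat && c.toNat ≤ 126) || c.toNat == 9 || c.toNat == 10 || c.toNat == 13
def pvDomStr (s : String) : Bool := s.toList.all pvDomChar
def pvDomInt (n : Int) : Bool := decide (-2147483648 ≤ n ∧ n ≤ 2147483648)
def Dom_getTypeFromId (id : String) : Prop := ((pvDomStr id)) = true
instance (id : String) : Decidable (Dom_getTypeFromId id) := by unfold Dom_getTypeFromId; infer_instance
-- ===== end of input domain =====

-- B replaces A's loop over the type table (startswith + break + accumulator) by one
-- fixed-length slice id[:7] and a single dict lookup with default "" (idiomatic).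

-- ===== PORT A =====
def pvTypes : List (String × String) :=
  [("amnhc_0", "Museum"), ("amnhp_1", "Person"), ("amnhc_2", "Expedition"),
   ("amnhc_3", "Department"), ("amnhc_4", "Permanent Exhibition"),
   ("amnhc_5", "Temporary Exhibition")]

-- the for-loop with break: scan keys in insertion order, take the first startswith match
def pvLoop (id : String) : List (String × String) → String
  | [] => ""
  | (k, v) :: rest => if PySem.Str.startswith id k then v else pvLoop id rest

def getTypeFromId (id : String) : String := pvLoop id pvTypes

-- ===== PORT B =====
def getTypeFromId_alt (id : String) : String :=
  (PySem.Dict.ofList pvTypes).getD (PySem.Str.slice id none (some 7)) ""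

-- ===== PRECONDITION & SPEC =====
def Spec_getTypeFromId (id : String) (out : String) : Prop := out = getTypeFromId_alt id
instance (id : String) (out : String) : Decidable (Spec_getTypeFromId id out) := by unfold Spec_getTypeFromId; infer_instance

-- ===== CLAIM (what is proved, stated in full; the proofs are below) =====
def Claim_equal_getTypeFromId : Prop := ∀ (id : String), Dom_getTypeFromId id → Spec_getTypeFromId id (getTypeFromId id)

-- ===== LEMMAS AND PROOFS =====

-- for a 7-char key k, startswith decides exactly "the first 7 chars equal k"
lemma startswith_take (l k : List Char) (h : k.length = 7) :
    PySem.Chars.startswith l k = decide (l.take 7 = k) := by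
  by_cases hp : l.take 7 = k
  · simp only [hp, decide_true]
    rw [PySem.Chars.startswith_iff, ← hp]
    exact List.take_prefix 7 l
  · simp only [hp, decide_false]
    rw [Bool.eq_false_iff, Ne, PySem.Chars.startswith_iff, List.prefix_iff_eq_take, h]
    exact fun heq => hp heq.symm

-- ===== VERDICT (by name: the statement is the Claim_ definition above) =====
theorem getTypeFromId_spec : Claim_equal_getTypeFromId := by
  intro id _
  have hs : (PySem.Str.slice id none (some 7)).toList = id.toList.take 7 := by
    rw [PySem.Str.toList_slice, PySem.Chars.slice_eq_listSlice, PySem.List.slice_to] <;> simp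
  have hbeq : ∀ k : String, (k == PySem.Str.slice id none (some 7)) =
      decide (id.toList.take 7 = k.toList) := by
    intro k
    rw [show (k == PySem.Str.slice id none (some 7)) =
        decide (k = PySem.Str.slice id none (some 7)) from by
          by_cases h : k = PySem.Str.slice id none (some 7) <;> simp [h]]
    exact decide_eq_decide.mpr (by rw [String.ext_iff, hs]; exact eq_comm)
  have h0 := startswith_take id.toList "amnhc_0".toList (by decide)
  have h1 := startswith_take id.toList "amnhp_1".toList (by decide)
  have h2 := startswith_take id.toList "amnhc_2".toList (by decide)
  have h3 := startswith_take id.toList "amnhc_3".toList (by decide)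
  have h4 := startswith_take id.toList "amnhc_4".toList (by decide)
  have h5 := startswith_take id.toList "amnhc_5".toList (by decide)
  unfold Spec_getTypeFromId getTypeFromId getTypeFromId_alt pvLoop pvTypes
  rw [show PySem.Dict.ofList
      [("amnhc_0", "Museum"), ("amnhp_1", "Person"), ("amnhc_2", "Expedition"),
       ("amnhc_3", "Department"), ("amnhc_4", "Permanent Exhibition"),
       ("amnhc_5", "Temporary Exhibition")] = PySem.Dict.mk
      [("amnhc_0", "Museum"), ("amnhp_1", "Person"), ("amnhc_2", "Expedition"),
       ("amnhc_3", "Department"), ("amnhc_4", "Permanent Exhibition"),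
       ("amnhc_5", "Temporary Exhibition")] from by decide]
  simp only [PySem.Str.startswith_eq, h0, h1, h2, h3, h4, h5, PySem.Dict.getD,
    PySem.Dict.get?_mk_cons, hbeq, pvLoop]
  split_ifs <;> simp_all [PySem.Dict.get?]
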